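-- pv_equiv track=rewrite | github.com/WeijiaTang/microgrid_sim | scripts/analysis/short_cross_fidelity_probe.py | _training_segments
-- ===== SOURCE A (Python) =====
-- def _training_segments(total_steps: int, checkpoint_interval: int) -> list[int]:
--     remaining = max(int(total_steps), 0)
--     if remaining <= 0:
--         return []
--     interval = max(int(checkpoint_interval), 0)
--     if interval <= 0 or interval >= remaining:
--         return [remaining]
--     chunks: list[int] = []
--     while remaining > 0:
--         chunk = min(interval, remaining)
--         chunks.append(int(chunk))
--         remaining -= int(chunk)
--     return chunks
-- ===== SOURCE B (Python) =====
-- def _training_segments(total_steps: int, checkpoint_interval: int) -> list[int]: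
--     remaining = max(int(total_steps), 0)
--     if remaining <= 0:
--         return []
--     interval = max(int(checkpoint_interval), 0)
--     if interval <= 0 or interval >= remaining:
--         return [remaining]
--     full, rem = divmod(remaining, interval)
--     return [interval] * full + ([rem] if rem else [])
-- ===== Notes on version B (the rewrite author's own statement) =====
-- stated objective: simpler
-- what changed: The repeated-subtraction while loop is replaced by a closed-form divmod: full chunks via list replication plus an optional remainder element.
import Mathlib
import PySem

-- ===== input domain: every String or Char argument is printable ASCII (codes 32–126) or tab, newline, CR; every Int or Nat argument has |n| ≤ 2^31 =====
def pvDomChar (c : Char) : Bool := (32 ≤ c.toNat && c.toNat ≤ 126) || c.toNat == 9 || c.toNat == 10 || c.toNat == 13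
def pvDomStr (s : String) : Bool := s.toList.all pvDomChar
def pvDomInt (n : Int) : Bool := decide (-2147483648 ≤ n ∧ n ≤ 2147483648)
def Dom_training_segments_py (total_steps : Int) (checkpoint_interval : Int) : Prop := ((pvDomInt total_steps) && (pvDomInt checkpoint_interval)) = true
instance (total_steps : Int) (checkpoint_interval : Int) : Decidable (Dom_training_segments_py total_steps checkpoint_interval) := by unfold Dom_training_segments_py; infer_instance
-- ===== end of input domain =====

-- B replaces the repeated-subtraction loop by a closed-form divmod (simpler; same values).
-- ===== PORT A =====
-- the while loop of A: guard makes the recursion total; A only reaches it with 0 < interval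
def trainingLoopA (interval : Int) (remaining : Int) : List Int :=
  if h : 0 < remaining ∧ 0 < interval then
    min interval remaining :: trainingLoopA interval (remaining - min interval remaining)
  else []
termination_by remaining.toNat
decreasing_by
  rcases h with ⟨h1, h2⟩
  rcases le_total interval remaining with h3 | h3 <;> simp [min_def] <;> omega

def training_segments_py (total_steps : Int) (checkpoint_interval : Int) : List Int :=
  let remaining := max total_steps 0
  if remaining ≤ 0 then []
  else
    let interval := max checkpoint_interval 0
    if interval ≤ 0 ∨ interval ≥ remaining then [remaining]
    else trainingLoopA interval remaining

-- ===== PORT B =====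
def training_segments_py_alt (total_steps : Int) (checkpoint_interval : Int) : List Int :=
  let remaining := max total_steps 0
  if remaining ≤ 0 then []
  else
    let interval := max checkpoint_interval 0
    if interval ≤ 0 ∨ interval ≥ remaining then [remaining]
    else
      let full := PySem.Int.floordiv remaining interval
      let rem := PySem.Int.mod remaining interval
      List.replicate full.toNat interval ++ (if rem ≠ 0 then [rem] else [])

-- ===== PRECONDITION & SPEC =====
def Spec_training_segments_py (total_steps : Int) (checkpoint_interval : Int) (out : List Int) : Prop := out = training_segments_py_alt total_steps checkpoint_interval
instance (total_steps : Int) (checkpoint_interval : Int) (out : List Int) : Decidable (Spec_training_segments_py total_steps checkpoint_interval out) := by unfold Spec_training_segments_py; infer_instance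

-- ===== CLAIM (what is proved, stated in full; the proofs are below) =====
def Claim_equal_training_segments_py : Prop := ∀ (total_steps : Int) (checkpoint_interval : Int), Dom_training_segments_py total_steps checkpoint_interval → Spec_training_segments_py total_steps checkpoint_interval (training_segments_py total_steps checkpoint_interval)

-- ===== LEMMAS AND PROOFS =====
lemma trainingLoopA_eq (n : Nat) : ∀ (interval remaining : Int), remaining.toNat ≤ n →
    0 < interval → 0 < remaining →
    trainingLoopA interval remaining =
      List.replicate (PySem.Int.floordiv remaining interval).toNat interval ++
        (if PySem.Int.mod remaining interval ≠ 0 then [PySem.Int.mod remaining interval] else []) := by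
  induction n with
  | zero => intro interval remaining hn hi hr; omega
  | succ n ih =>
    intro interval remaining hn hi hr
    rw [PySem.Int.floordiv_eq_ediv_of_pos hi, PySem.Int.mod_eq_emod_of_pos hi]
    rw [trainingLoopA]
    simp only [hi, hr, and_self, dite_true]
    by_cases hle : remaining ≤ interval
    case pos =>
      have hmin : min interval remaining = remaining := by omega
      rw [hmin]
      rw [trainingLoopA]
      simp only [sub_self, lt_irrefl, false_and, dite_false]
      rcases eq_or_lt_of_le hle with heq | hlt2
      · subst heq
        have : remaining / remaining = 1 := Int.ediv_self (by omega)
        have h2 : remaining % remaining = 0 := Int.emod_self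
        simp [this]
      · have hd : remaining / interval = 0 := Int.ediv_eq_zero_of_lt (by omega) hlt2
        have hm : remaining % interval = remaining := Int.emod_eq_of_lt (by omega) hlt2
        have hne : remaining ≠ 0 := by omega
        simp [hd, hm, hne]
    case neg =>
      have hlt : interval < remaining := by omega
      have hmin : min interval remaining = interval := by omega
      rw [hmin]
      rw [ih interval (remaining - interval) (by omega) hi (by omega)]
      rw [PySem.Int.floordiv_eq_ediv_of_pos hi, PySem.Int.mod_eq_emod_of_pos hi]
      have hm : (remaining - interval) % interval = remaining % interval := by
        exact Int.sub_emod_right _ _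
      have hq : remaining / interval = (remaining - interval) / interval + 1 := by
        conv_lhs => rw [show remaining = (remaining - interval) + 1 * interval by ring]
        rw [Int.add_mul_ediv_right _ _ (by omega : interval ≠ 0)]
      have hq0 : 0 ≤ (remaining - interval) / interval := Int.ediv_nonneg (by omega) (by omega)
      rw [hm, hq]
      have : (((remaining - interval) / interval + 1)).toNat = ((remaining - interval) / interval).toNat + 1 := by omega
      rw [this, List.replicate_succ]
      simp


-- ===== VERDICT (by name: the statement is the Claim_ definition above) =====
theorem training_segments_py_spec : Claim_equal_training_segments_py := by
  intro total_steps checkpoint_interval _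
  unfold Spec_training_segments_py training_segments_py training_segments_py_alt
  by_cases h1 : max total_steps 0 ≤ 0
  · rw [if_pos h1, if_pos h1]
  · rw [if_neg h1, if_neg h1]
    by_cases h2 : max checkpoint_interval 0 ≤ 0 ∨ max checkpoint_interval 0 ≥ max total_steps 0
    · rw [if_pos h2, if_pos h2]
    · rw [if_neg h2, if_neg h2]
      exact trainingLoopA_eq (max total_steps 0).toNat _ _ le_rfl (by omega) (by omega)
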